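-- pv_equiv track=rewrite | github.com/moble/PostNewtonian | Waveforms/simpletensors.py | DelimitString
-- ===== SOURCE A (Python) =====
-- def DelimitString(S, latex=True):
--     "Surround string by parentheses, brackets, or braces as appropriate"
--     if(latex):
--         left, right = [r'\left', r'\right']
--         DelimiterOpeners, DelimiterClosers = [['(','[',r'\{'], [')',']',r'\}']]
--     else:
--         left, right = ['', '']
--         DelimiterOpeners, DelimiterClosers = ['([{', ')]}']
--     def FindFirst(S, D):
--         for i,s in enumerate(S):
--             if(s=='\\' and i+1<len(S)):
--                 s += S[i+1]
--             for d in D: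
--                 if(s==d):
--                     return d
--     FirstDelim = FindFirst(S, DelimiterOpeners)
--     if(not FirstDelim):
--         return left+'('+S+right+')'
--     NewDelimiterIndex = (DelimiterOpeners.index(FindFirst(S, DelimiterOpeners))+1) % len(DelimiterOpeners)
--     return r'{0}{1} {2} {3}{4}'.format(left, DelimiterOpeners[NewDelimiterIndex],
--                                        S, right, DelimiterClosers[NewDelimiterIndex])
-- ===== SOURCE B (Python) =====
-- def DelimitString(S, latex=True):
--     "Surround string by parentheses, brackets, or braces as appropriate"
--     if latex:
--         left, right = r'\left', r'\right'
--         tokens = [('(', ')'), ('[', ']'), (r'\{', r'\}')]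
--     else:
--         left, right = '', ''
--         tokens = [('(', ')'), ('[', ']'), ('{', '}')]
--     # earliest-occurring opener via per-token library searches + minimum
--     best = None
--     for k, (opener, closer) in enumerate(tokens):
--         p = S.find(opener)
--         if p >= 0 and (best is None or p < best[0]):
--             best = (p, k)
--     if best is None:
--         return left + '(' + S + right + ')'
--     opener, closer = tokens[(best[1] + 1) % 3]
--     return left + opener + ' ' + S + ' ' + right + closer
-- ===== Notes on version B (the rewrite author's own statement) =====
-- stated objective: faster
-- what changed: Replaces A's manual per-character scan (with in-loop backslash pairing and an inner loop over delimiter tokens, plus a second full rescan and a list.index pass) by one str.find per delimiter token and a minimum over the found positions, with a cyclic token table giving the next (opener, closer) pair directly.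
import Mathlib
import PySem

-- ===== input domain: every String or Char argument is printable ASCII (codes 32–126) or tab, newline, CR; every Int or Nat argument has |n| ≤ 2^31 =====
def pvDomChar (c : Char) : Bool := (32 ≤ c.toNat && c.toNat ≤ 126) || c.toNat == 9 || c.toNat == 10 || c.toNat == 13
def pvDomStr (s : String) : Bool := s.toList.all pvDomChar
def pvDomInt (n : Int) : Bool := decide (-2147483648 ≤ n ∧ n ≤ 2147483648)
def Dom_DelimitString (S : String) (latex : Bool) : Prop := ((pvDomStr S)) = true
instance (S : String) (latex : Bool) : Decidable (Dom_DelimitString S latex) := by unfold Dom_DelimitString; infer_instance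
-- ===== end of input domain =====

-- B replaces A's per-character scan (backslash pairing + inner token loop, a second rescan and a
-- list.index pass) by one str.find per delimiter token and a minimum of positions with a cyclic
-- next-token table; objective: faster by a constant factor (C-level find vs interpreted loop).


-- ===== PORT A =====
-- Python str is handled as List Char (exact for '+', '=='); outputs built with String.mk.
-- FindFirst: for i,s in enumerate(S): if s=='\\' and i+1<len(S): s += S[i+1]; for d in D: if s==d: return d
def pyFindFirst (cs : List Char) (D : List (List Char)) : Option (List Char) :=
  match cs with
  | [] => none
  | c :: rest =>
    let s : List Char :=
      match rest.head? with        -- i+1 < len(S) ↔ the tail is nonempty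
      | some c2 => if c = '\\' then [c, c2] else [c]
      | none => [c]
    match D.find? (fun d => decide (d = s)) with
    | some d => some d
    | none => pyFindFirst rest D

def DelimitString (S : String) (latex : Bool) : String :=
  let left : List Char := if latex then ['\\','l','e','f','t'] else []
  let right : List Char := if latex then ['\\','r','i','g','h','t'] else []
  let openers : List (List Char) := if latex then [['('],['['],['\\','{']] else [['('],['['],['{']]
  let closers : List (List Char) := if latex then [[')'],[']'],['\\','}']] else [[')'],[']'],['}']]
  match pyFindFirst S.toList openers with
  | none => String.mk (left ++ ['('] ++ S.toList ++ right ++ [')'])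
  | some d =>
    -- Python's .index cannot fail here (the found token is in the list), so getD 0 is unreachable;
    -- list indexing is in range, so getD [] is unreachable
    let idx : Nat := ((PySem.List.index? openers d).getD 0 + 1) % openers.length
    String.mk (left ++ (openers.getD idx []) ++ [' '] ++ S.toList ++ [' '] ++ right ++ (closers.getD idx []))

-- ===== PORT B =====
-- the best-update of Source B's loop body: if p >= 0 and (best is None or p < best[0]): best = (p, k)
def altStep (best : Option (Int × Nat)) (p : Int) (k : Nat) : Option (Int × Nat) :=
  match best with
  | none => if 0 ≤ p then some (p, k) else none
  | some b => if 0 ≤ p ∧ p < b.1 then some (p, k) else some b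

def DelimitString_alt (S : String) (latex : Bool) : String :=
  let left : List Char := if latex then ['\\','l','e','f','t'] else []
  let right : List Char := if latex then ['\\','r','i','g','h','t'] else []
  let tokens : List (List Char × List Char) :=
    if latex then [(['('],[')']), (['['],[']']), (['\\','{'],['\\','}'])]
    else [(['('],[')']), (['['],[']']), (['{'],['}'])]
  -- S.find(opener) is PySem.Chars.find on S.toList (= PySem.Str.find)
  let best := tokens.zipIdx.foldl
    (fun best tk => altStep best (PySem.Chars.find S.toList tk.1.1) tk.2)
    (none : Option (Int × Nat))
  match best with
  | none => String.mk (left ++ ['('] ++ S.toList ++ right ++ [')'])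
  | some b =>
    let oc := tokens.getD ((b.2 + 1) % 3) ([], [])
    String.mk (left ++ oc.1 ++ [' '] ++ S.toList ++ [' '] ++ right ++ oc.2)

-- ===== PRECONDITION & SPEC =====
def Spec_DelimitString (S : String) (latex : Bool) (out : String) : Prop := out = DelimitString_alt S latex
instance (S : String) (latex : Bool) (out : String) : Decidable (Spec_DelimitString S latex out) := by unfold Spec_DelimitString; infer_instance

-- ===== CLAIM (what is proved, stated in full; the proofs are below) =====
def Claim_equal_DelimitString : Prop := ∀ (S : String) (latex : Bool), Dom_DelimitString S latex → Spec_DelimitString S latex (DelimitString S latex)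

-- ===== LEMMAS AND PROOFS =====

theorem go_shift (sub : List Char) (l : List Char) (k : Nat) :
    PySem.Chars.find.go sub l k =
      if PySem.Chars.find.go sub l 0 = -1 then -1 else PySem.Chars.find.go sub l 0 + k := by
  induction l generalizing k with
  | nil =>
    simp only [PySem.Chars.find.go]
    split_ifs <;> first | rfl | contradiction | omega
  | cons c rest ih =>
    have hb : (-1 : Int) ≤ PySem.Chars.find.go sub rest 0 := PySem.Chars.neg_one_le_find rest sub
    simp only [PySem.Chars.find.go]
    by_cases hp : sub.isPrefixOf (c :: rest) = true
    · simp [hp]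
    · simp only [hp, if_false, Bool.false_eq_true]
      rw [ih (k + 1), ih 1]
      split_ifs <;> omega

theorem find_cons (c : Char) (rest sub : List Char) :
    PySem.Chars.find (c :: rest) sub =
      if sub.isPrefixOf (c :: rest) then 0
      else if PySem.Chars.find rest sub = -1 then -1 else PySem.Chars.find rest sub + 1 := by
  show PySem.Chars.find.go sub (c :: rest) 0 = _
  rw [PySem.Chars.find.go]
  by_cases hp : sub.isPrefixOf (c :: rest) = true
  · simp [hp]
  · simp only [hp, if_false, Bool.false_eq_true]
    rw [go_shift]
    rfl

theorem chain_spec (f1 f2 f3 : Int) :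
    altStep (altStep (altStep none f1 0) f2 1) f3 2 =
      if 0 ≤ f1 then
        if 0 ≤ f2 ∧ f2 < f1 then
          if 0 ≤ f3 ∧ f3 < f2 then some (f3, 2) else some (f2, 1)
        else if 0 ≤ f3 ∧ f3 < f1 then some (f3, 2) else some (f1, 0)
      else if 0 ≤ f2 then
        if 0 ≤ f3 ∧ f3 < f2 then some (f3, 2) else some (f2, 1)
      else if 0 ≤ f3 then some (f3, 2) else none := by
  by_cases h1 : 0 ≤ f1
  · rw [show altStep none f1 0 = some (f1, 0) from by simp [altStep, h1]]
    by_cases h2 : 0 ≤ f2 ∧ f2 < f1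
    · rw [show altStep (some (f1, 0)) f2 1 = some (f2, 1) from by simp [altStep, if_pos h2]]
      by_cases h3 : 0 ≤ f3 ∧ f3 < f2
      · rw [show altStep (some (f2, 1)) f3 2 = some (f3, 2) from by simp [altStep, if_pos h3]]
        simp [h1, h2, h3]
      · rw [show altStep (some (f2, 1)) f3 2 = some (f2, 1) from by simp [altStep, if_neg h3]]
        simp [h1, h2, h3]
    · rw [show altStep (some (f1, 0)) f2 1 = some (f1, 0) from by simp [altStep, if_neg h2]]
      by_cases h3 : 0 ≤ f3 ∧ f3 < f1
      · rw [show altStep (some (f1, 0)) f3 2 = some (f3, 2) from by simp [altStep, if_pos h3]]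
        simp [h1, h2, h3]
      · rw [show altStep (some (f1, 0)) f3 2 = some (f1, 0) from by simp [altStep, if_neg h3]]
        simp [h1, h2, h3]
  · rw [show altStep none f1 0 = none from by simp [altStep, h1]]
    by_cases h2 : 0 ≤ f2
    · rw [show altStep none f2 1 = some (f2, 1) from by simp [altStep, h2]]
      by_cases h3 : 0 ≤ f3 ∧ f3 < f2
      · rw [show altStep (some (f2, 1)) f3 2 = some (f3, 2) from by simp [altStep, if_pos h3]]
        simp [h1, h2, h3]
      · rw [show altStep (some (f2, 1)) f3 2 = some (f2, 1) from by simp [altStep, if_neg h3]]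
        simp [h1, h2, h3]
    · rw [show altStep none f2 1 = none from by simp [altStep, h2]]
      by_cases h3 : 0 ≤ f3
      · rw [show altStep none f3 2 = some (f3, 2) from by simp [altStep, h3]]
        simp [h1, h2, h3]
      · rw [show altStep none f3 2 = none from by simp [altStep, h3]]
        simp [h1, h2, h3]

set_option maxHeartbeats 1000000 in
theorem chain_shift_map (D : List (List Char)) (f1 f2 f3 : Int)
    (h1 : -1 ≤ f1) (h2 : -1 ≤ f2) (h3 : -1 ≤ f3) :
    Option.map (fun b : Int × Nat => D.getD b.2 [])
      (altStep (altStep (altStep none (if f1 = -1 then -1 else f1 + 1) 0)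
        (if f2 = -1 then -1 else f2 + 1) 1) (if f3 = -1 then -1 else f3 + 1) 2) =
    Option.map (fun b : Int × Nat => D.getD b.2 [])
      (altStep (altStep (altStep none f1 0) f2 1) f3 2) := by
  rw [chain_spec, chain_spec]
  split_ifs <;> first | rfl | omega

set_option maxHeartbeats 1000000 in
theorem key_latex (l : List Char) :
    pyFindFirst l [['('],['['],['\\','{']] =
      Option.map (fun b : Int × Nat => [['('],['['],['\\','{']].getD b.2 [])
        (altStep (altStep (altStep none (PySem.Chars.find l ['(']) 0)
          (PySem.Chars.find l ['[']) 1) (PySem.Chars.find l ['\\','{']) 2) := by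
  induction l with
  | nil => rfl
  | cons c rest ih =>
    have hb1 : (-1 : Int) ≤ PySem.Chars.find rest ['('] := PySem.Chars.neg_one_le_find rest _
    have hb2 : (-1 : Int) ≤ PySem.Chars.find rest ['['] := PySem.Chars.neg_one_le_find rest _
    have hb3 : (-1 : Int) ≤ PySem.Chars.find rest ['\\','{'] := PySem.Chars.neg_one_le_find rest _
    rw [find_cons, find_cons, find_cons]
    by_cases hc1 : c = '('
    · subst hc1
      rw [show pyFindFirst ('(' :: rest) [['('],['['],['\\','{']] = some ['('] from by
        cases rest <;> simp [pyFindFirst]]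
      simp only [List.isPrefixOf, List.isPrefixOf_cons₂, List.isPrefixOf_nil_left]
      simp only [show (('(' : Char) == '(') = true from rfl,
                 show (('[' : Char) == '(') = false from rfl,
                 show (('\\' : Char) == '(') = false from rfl]
      simp only [Bool.true_and, Bool.false_and, Bool.and_true, Bool.false_eq_true,
                 eq_self_iff_true, if_true, if_false]
      rw [chain_spec]
      split_ifs <;> first | rfl | omega
    · by_cases hc2 : c = '['
      · subst hc2
        rw [show pyFindFirst ('[' :: rest) [['('],['['],['\\','{']] = some ['['] from by
          cases rest <;> simp [pyFindFirst]]
        simp only [List.isPrefixOf, List.isPrefixOf_cons₂, List.isPrefixOf_nil_left]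
        simp only [show (('(' : Char) == '[') = false from rfl,
                   show (('[' : Char) == '[') = true from rfl,
                   show (('\\' : Char) == '[') = false from rfl]
        simp only [Bool.true_and, Bool.false_and, Bool.and_true, Bool.false_eq_true,
                   eq_self_iff_true, if_true, if_false]
        rw [chain_spec]
        split_ifs <;> first | rfl | omega
      · by_cases hc3 : c = '\\'
        · subst hc3
          cases rest with
          | nil => rfl
          | cons c2 rest' =>
            by_cases hc2' : c2 = '{'
            · subst hc2'
              rw [show pyFindFirst ('\\' :: '{' :: rest') [['('],['['],['\\','{']] =
                  some ['\\','{'] from by simp [pyFindFirst]]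
              simp only [List.isPrefixOf, List.isPrefixOf_cons₂, List.isPrefixOf_nil_left]
              simp only [show (('(' : Char) == '\\') = false from rfl,
                         show (('[' : Char) == '\\') = false from rfl,
                         show (('\\' : Char) == '\\') = true from rfl,
                         show (('{' : Char) == '{') = true from rfl]
              simp only [Bool.true_and, Bool.false_and, Bool.and_true, Bool.false_eq_true,
                         eq_self_iff_true, if_true, if_false]
              rw [chain_spec]
              split_ifs <;> first | rfl | omega
            · rw [show pyFindFirst ('\\' :: c2 :: rest') [['('],['['],['\\','{']] =
                  pyFindFirst (c2 :: rest') [['('],['['],['\\','{']] from by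
                    simp [pyFindFirst, Ne.symm hc2'], ih]
              simp only [List.isPrefixOf, List.isPrefixOf_cons₂, List.isPrefixOf_nil_left]
              simp only [show (('(' : Char) == '\\') = false from rfl,
                         show (('[' : Char) == '\\') = false from rfl,
                         show (('\\' : Char) == '\\') = true from rfl,
                         show (('{' : Char) == c2) = false from by simp [Ne.symm hc2']]
              simp only [Bool.true_and, Bool.false_and, Bool.and_true, Bool.and_false,
                         Bool.false_eq_true, if_true, if_false]
              exact (chain_shift_map _ _ _ _ hb1 hb2 hb3).symm
        · rw [show pyFindFirst (c :: rest) [['('],['['],['\\','{']] =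
              pyFindFirst rest [['('],['['],['\\','{']] from by
                cases rest <;> simp [pyFindFirst, hc3, Ne.symm hc1, Ne.symm hc2], ih]
          simp only [List.isPrefixOf, List.isPrefixOf_cons₂, List.isPrefixOf_nil_left]
          simp only [show (('(' : Char) == c) = false from by simp [Ne.symm hc1],
                     show (('[' : Char) == c) = false from by simp [Ne.symm hc2],
                     show (('\\' : Char) == c) = false from by simp [Ne.symm hc3]]
          simp only [Bool.false_and, Bool.false_eq_true, if_false]
          exact (chain_shift_map _ _ _ _ hb1 hb2 hb3).symm

set_option maxHeartbeats 1000000 in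
theorem key_plain (l : List Char) :
    pyFindFirst l [['('],['['],['{']] =
      Option.map (fun b : Int × Nat => [['('],['['],['{']].getD b.2 [])
        (altStep (altStep (altStep none (PySem.Chars.find l ['(']) 0)
          (PySem.Chars.find l ['[']) 1) (PySem.Chars.find l ['{']) 2) := by
  induction l with
  | nil => rfl
  | cons c rest ih =>
    have hb1 : (-1 : Int) ≤ PySem.Chars.find rest ['('] := PySem.Chars.neg_one_le_find rest _
    have hb2 : (-1 : Int) ≤ PySem.Chars.find rest ['['] := PySem.Chars.neg_one_le_find rest _
    have hb3 : (-1 : Int) ≤ PySem.Chars.find rest ['{'] := PySem.Chars.neg_one_le_find rest _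
    rw [find_cons, find_cons, find_cons]
    by_cases hc1 : c = '('
    · subst hc1
      rw [show pyFindFirst ('(' :: rest) [['('],['['],['{']] = some ['('] from by
        cases rest <;> simp [pyFindFirst]]
      simp only [List.isPrefixOf, List.isPrefixOf_cons₂, List.isPrefixOf_nil_left]
      simp only [show (('(' : Char) == '(') = true from rfl,
                 show (('[' : Char) == '(') = false from rfl,
                 show (('{' : Char) == '(') = false from rfl]
      simp only [Bool.true_and, Bool.false_and, Bool.and_true, Bool.false_eq_true,
                 eq_self_iff_true, if_true, if_false]
      rw [chain_spec]
      split_ifs <;> first | rfl | omega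
    · by_cases hc2 : c = '['
      · subst hc2
        rw [show pyFindFirst ('[' :: rest) [['('],['['],['{']] = some ['['] from by
          cases rest <;> simp [pyFindFirst]]
        simp only [List.isPrefixOf, List.isPrefixOf_cons₂, List.isPrefixOf_nil_left]
        simp only [show (('(' : Char) == '[') = false from rfl,
                   show (('[' : Char) == '[') = true from rfl,
                   show (('{' : Char) == '[') = false from rfl]
        simp only [Bool.true_and, Bool.false_and, Bool.and_true, Bool.false_eq_true,
                   eq_self_iff_true, if_true, if_false]
        rw [chain_spec]
        split_ifs <;> first | rfl | omega
      · by_cases hc3 : c = '{'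
        · subst hc3
          rw [show pyFindFirst ('{' :: rest) [['('],['['],['{']] = some ['{'] from by
            cases rest <;> simp [pyFindFirst]]
          simp only [List.isPrefixOf, List.isPrefixOf_cons₂, List.isPrefixOf_nil_left]
          simp only [show (('(' : Char) == '{') = false from rfl,
                     show (('[' : Char) == '{') = false from rfl,
                     show (('{' : Char) == '{') = true from rfl]
          simp only [Bool.true_and, Bool.false_and, Bool.and_true, Bool.false_eq_true,
                     eq_self_iff_true, if_true, if_false]
          rw [chain_spec]
          split_ifs <;> first | rfl | omega
        · have hL : pyFindFirst (c :: rest) [['('],['['],['{']] =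
              pyFindFirst rest [['('],['['],['{']] := by
            cases rest with
            | nil => simp [pyFindFirst, Ne.symm hc1, Ne.symm hc2, Ne.symm hc3]
            | cons d t =>
              by_cases hbs : c = '\\'
              · subst hbs; simp [pyFindFirst]
              · simp [pyFindFirst, hbs, Ne.symm hc1, Ne.symm hc2, Ne.symm hc3]
          rw [hL, ih]
          simp only [List.isPrefixOf, List.isPrefixOf_cons₂, List.isPrefixOf_nil_left]
          simp only [show (('(' : Char) == c) = false from by simp [Ne.symm hc1],
                     show (('[' : Char) == c) = false from by simp [Ne.symm hc2],
                     show (('{' : Char) == c) = false from by simp [Ne.symm hc3]]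
          simp only [Bool.false_and, Bool.false_eq_true, if_false]
          exact (chain_shift_map _ _ _ _ hb1 hb2 hb3).symm

-- ===== VERDICT (by name: the statement is the Claim_ definition above) =====
theorem DelimitString_spec : Claim_equal_DelimitString := by
  intro S latex _
  show DelimitString S latex = DelimitString_alt S latex
  cases latex
  · rw [DelimitString, DelimitString_alt]
    simp only [Bool.false_eq_true, if_false]
    rw [show (([(['('],[')']), (['['],[']']), (['{'],['}'])] : List (List Char × List Char)).zipIdx.foldl
        (fun best tk => altStep best (PySem.Chars.find S.toList tk.1.1) tk.2) none)
      = altStep (altStep (altStep none (PySem.Chars.find S.toList ['(']) 0)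
          (PySem.Chars.find S.toList ['[']) 1) (PySem.Chars.find S.toList ['{']) 2 from rfl]
    rw [key_plain S.toList, chain_spec]
    split_ifs <;> simp [PySem.List.index?] <;> rfl
  · rw [DelimitString, DelimitString_alt]
    simp only [if_pos]
    rw [show (([(['('],[')']), (['['],[']']), (['\\','{'],['\\','}'])] : List (List Char × List Char)).zipIdx.foldl
        (fun best tk => altStep best (PySem.Chars.find S.toList tk.1.1) tk.2) none)
      = altStep (altStep (altStep none (PySem.Chars.find S.toList ['(']) 0)
          (PySem.Chars.find S.toList ['[']) 1) (PySem.Chars.find S.toList ['\\','{']) 2 from rfl]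
    rw [key_latex S.toList, chain_spec]
    split_ifs <;> simp [PySem.List.index?] <;> rfl
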